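-- pv_equiv track=rewrite | github.com/adbassett/wisq | src/wisq/__init__.py | find_alap_times
-- ===== SOURCE A (Python) =====
-- def find_alap_times(succ: dict[int, list[int]], pred: dict[int, list[int]], asap: list[int]) -> list[int]:
--     n = len(asap)
--     h = max(asap) + 1  # upper bound
--     alap = [h] * n
--     order = sorted(range(n), key=lambda i: asap[i], reverse=True)  # asap descending
--     for u in order:
--         if not succ.get(u):
--             alap[u] = asap[u]  # leaf
--         else:
--             alap[u] = min(alap[v] - 1 for v in succ[u])
--             alap[u] = max(alap[u], asap[u])
--     return alap
-- ===== SOURCE B (Python) =====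
-- def find_alap_times(succ: dict[int, list[int]], pred: dict[int, list[int]], asap: list[int]) -> list[int]:
--     memo: dict[int, int] = {}
--
--     def alap_of(u: int) -> int:
--         if u in memo:
--             return memo[u]
--         cs = succ.get(u)
--         t = asap[u] if not cs else max(asap[u], min(alap_of(v) - 1 for v in cs))
--         memo[u] = t
--         return t
--
--     return [alap_of(u) for u in range(len(asap))]
-- ===== Notes on version B (the rewrite author's own statement) =====
-- stated objective: alternative
-- what changed: A sorts the node indices by descending ASAP time and sweeps them once, updating an alap array in place; B drops the sort and the sweep entirely and computes each node's ALAP time by a memoized top-down recursion over the successor graph. Pre_ restricts to well-formed ALAP problem instances: nonempty asap, successor indices inside range(n), and an asap labelling consistent with the precedence graph (asap strictly increases along every edge, which also rules out cycles); …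
-- outside the precondition, e.g. on find_alap_times({0: [1], 1: [2]}, {}, [1, 0, 5]): A returns [5, 4, 5], B returns [3, 4, 5]; on find_alap_times({0: [1], 1: [0]}, {}, [0, 0]): A returns [0, 0], B raises RecursionError; on find_alap_times({1: [-1]}, {}, [3, 0]): A returns [3, 3], B returns [3, 0]
import Mathlib
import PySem

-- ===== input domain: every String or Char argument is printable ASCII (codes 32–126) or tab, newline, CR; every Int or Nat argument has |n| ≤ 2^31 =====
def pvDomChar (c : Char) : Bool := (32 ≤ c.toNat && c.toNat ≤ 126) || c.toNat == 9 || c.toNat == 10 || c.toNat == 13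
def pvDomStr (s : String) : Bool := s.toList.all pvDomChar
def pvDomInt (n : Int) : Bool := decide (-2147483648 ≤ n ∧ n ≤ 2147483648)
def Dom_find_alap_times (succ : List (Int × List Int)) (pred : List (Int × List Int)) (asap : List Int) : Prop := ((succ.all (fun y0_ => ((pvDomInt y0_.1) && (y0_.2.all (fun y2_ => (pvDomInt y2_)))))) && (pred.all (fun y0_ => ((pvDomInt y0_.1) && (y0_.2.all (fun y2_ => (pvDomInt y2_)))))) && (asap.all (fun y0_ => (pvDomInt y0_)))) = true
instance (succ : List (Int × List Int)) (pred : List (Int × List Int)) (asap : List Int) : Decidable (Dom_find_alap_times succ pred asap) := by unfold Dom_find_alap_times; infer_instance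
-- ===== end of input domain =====

-- B replaces A's descending-ASAP sort-and-sweep by a memoized top-down recursion over the
-- successor graph (objective: alternative decomposition, same cost class).

-- shared helper: `succ.get(u)` on the dict passed as an association list (first match)
def pvGet (d : List (Int × List Int)) (k : Int) : Option (List Int) :=
  (PySem.Dict.mk d).get? k

-- ===== PORT A =====
-- body of A's `for u in order:` loop (the two assignments to alap[u] folded into one store of the same value)
def pvStepA (succ : List (Int × List Int)) (asap : List Int) (alap : List Int) (u : Int) : List Int :=
  match pvGet succ u with
  | none => PySem.List.pySetD alap u (PySem.List.pyGetD asap u 0)        -- leaf (no entry)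
  | some [] => PySem.List.pySetD alap u (PySem.List.pyGetD asap u 0)    -- leaf (empty successor list)
  | some l =>
      let mn := (PySem.List.min? (l.map (fun v => PySem.List.pyGetD alap v 0 - 1)) (fun x => x)).getD 0
      PySem.List.pySetD alap u (max mn (PySem.List.pyGetD asap u 0))

def find_alap_times (succ : List (Int × List Int)) (pred : List (Int × List Int)) (asap : List Int) : List Int :=
  let n := asap.length
  match PySem.List.max? asap (fun x => x) with
  | none => []    -- max(asap) on empty asap: ValueError, excluded by Pre_
  | some m =>
      let h := m + 1
      let alap := List.replicate n h
      let order := PySem.List.sorted (PySem.List.pyRange 0 (n : Int) 1) (fun i => PySem.List.pyGetD asap i 0) true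
      order.foldl (pvStepA succ asap) alap

-- ===== PORT B =====
-- `alap_of(u)` of Source B; the memo dict of Source B is a pure value cache, ported as the recursion
-- itself; the fuel argument only makes the recursion structural (find_alap_times_alt passes
-- n+1, which under Pre_ exceeds the recursion depth, so the fuel-0 branch is unreachable)
def pvCompute (succ : List (Int × List Int)) (asap : List Int) : Nat → Int → Int
  | 0, _ => 0
  | fuel+1, u =>
      match pvGet succ u with
      | none => PySem.List.pyGetD asap u 0
      | some [] => PySem.List.pyGetD asap u 0
      | some l =>
          max (PySem.List.pyGetD asap u 0)
            ((PySem.List.min? (l.map (fun v => pvCompute succ asap fuel v - 1)) (fun x => x)).getD 0)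

def find_alap_times_alt (succ : List (Int × List Int)) (pred : List (Int × List Int)) (asap : List Int) : List Int :=
  (PySem.List.pyRange 0 (asap.length : Int) 1).map
    (fun u => pvCompute succ asap (asap.length + 1) u)

-- ===== PRECONDITION & SPEC =====
-- Pre_ restricts to well-formed ALAP problem instances: nonempty asap, successor indices inside
-- range(n), and an asap labelling consistent with the precedence graph (asap strictly increases
-- along every edge, so the graph is acyclic); outside that A raises, silently wraps negative
-- indices, or returns values that read the unprocessed upper bound h in sweep order, and B's
-- recursion need not terminate.
def Pre_find_alap_times (succ : List (Int × List Int)) (pred : List (Int × List Int)) (asap : List Int) : Prop :=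
  asap ≠ [] ∧ ∀ u ∈ PySem.List.pyRange 0 (asap.length : Int) 1,
    ∀ v ∈ (pvGet succ u).getD [],
      (0 ≤ v ∧ v < (asap.length : Int)) ∧
        PySem.List.pyGetD asap u 0 < PySem.List.pyGetD asap v 0
instance (succ : List (Int × List Int)) (pred : List (Int × List Int)) (asap : List Int) : Decidable (Pre_find_alap_times succ pred asap) := by unfold Pre_find_alap_times; infer_instance

def pvWitness_find_alap_times : (List (Int × List Int)) × (List (Int × List Int)) × List Int :=
  ([(0, [1]), (1, [])], [], [0, 1])

def Spec_find_alap_times (succ : List (Int × List Int)) (pred : List (Int × List Int)) (asap : List Int) (out : List Int) : Prop := out = find_alap_times_alt succ pred asap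
instance (succ : List (Int × List Int)) (pred : List (Int × List Int)) (asap : List Int) (out : List Int) : Decidable (Spec_find_alap_times succ pred asap out) := by unfold Spec_find_alap_times; infer_instance

-- ===== CLAIM (what is proved, stated in full; the proofs are below) =====
def Claim_equal_find_alap_times : Prop := ∀ (succ : List (Int × List Int)) (pred : List (Int × List Int)) (asap : List Int), Dom_find_alap_times succ pred asap → Pre_find_alap_times succ pred asap → Spec_find_alap_times succ pred asap (find_alap_times succ pred asap)


-- ===== LEMMAS AND PROOFS =====

-- `v is finished strictly before u` in A's descending-asap stable sweep (proof-side only)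
def pvBefore (asap : List Int) (v u : Int) : Bool :=
  decide (PySem.List.pyGetD asap u 0 < PySem.List.pyGetD asap v 0 ∨
    (PySem.List.pyGetD asap v 0 = PySem.List.pyGetD asap u 0 ∧ v < u))

-- `rank u`: how many nodes of range(n) are finished strictly before u (proof-side measure)
def pvRank (asap : List Int) (u : Int) : Nat :=
  ((Finset.range asap.length).filter (fun j : ℕ => pvBefore asap (↑j) u)).card

lemma pvBefore_trans {asap : List Int} {a b c : Int}
    (h1 : pvBefore asap a b = true) (h2 : pvBefore asap b c = true) : pvBefore asap a c = true := by
  simp only [pvBefore, decide_eq_true_iff] at *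
  omega

lemma pvBefore_irrefl (asap : List Int) (a : Int) : pvBefore asap a a = false := by
  simp only [pvBefore, decide_eq_false_iff_not]
  omega

lemma pvBefore_asymm {asap : List Int} {a b : Int}
    (h1 : pvBefore asap a b = true) (h2 : pvBefore asap b a = true) : False := by
  simp only [pvBefore, decide_eq_true_iff] at *
  omega

lemma pvRank_lt {asap : List Int} {w u : Int} (hw0 : 0 ≤ w) (hwn : w < (asap.length : Int))
    (hR : pvBefore asap w u = true) : pvRank asap w < pvRank asap u := by
  apply Finset.card_lt_card
  constructor
  · intro j hj
    simp only [Finset.mem_filter, Finset.mem_range] at *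
    exact ⟨hj.1, pvBefore_trans hj.2 hR⟩
  · intro hsub
    have hcast : ((w.toNat : Int)) = w := by omega
    have hw : w.toNat ∈ (Finset.range asap.length).filter (fun j : ℕ => pvBefore asap (↑j) u) := by
      simp only [Finset.mem_filter, Finset.mem_range]
      exact ⟨by omega, by rw [hcast]; exact hR⟩
    have hw2 := hsub hw
    simp only [Finset.mem_filter, Finset.mem_range, hcast] at hw2
    have := pvBefore_irrefl asap w
    simp [this] at hw2

lemma pvRank_le (asap : List Int) (u : Int) : pvRank asap u ≤ asap.length := by
  calc pvRank asap u ≤ (Finset.range asap.length).card := Finset.card_filter_le _ _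
    _ = asap.length := Finset.card_range _

-- with enough fuel, pvCompute is fuel-independent (Pre_ bounds the recursion by pvRank)
lemma pvCompute_fuel (succ : List (Int × List Int)) (asap : List Int)
    (hpre : ∀ u ∈ PySem.List.pyRange 0 (asap.length : Int) 1,
      ∀ v ∈ (pvGet succ u).getD [],
        (0 ≤ v ∧ v < (asap.length : Int)) ∧
          PySem.List.pyGetD asap u 0 < PySem.List.pyGetD asap v 0) :
    ∀ (f : Nat) (u : Int), 0 ≤ u → u < (asap.length : Int) → pvRank asap u < f →
    pvCompute succ asap f u = pvCompute succ asap (pvRank asap u + 1) u := by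
  intro f
  induction f using Nat.strong_induction_on with
  | _ f IH =>
    intro u hu0 hun hu
    match f with
    | 0 => omega
    | f' + 1 =>
      simp only [pvCompute]
      cases hg : pvGet succ u with
      | none => rfl
      | some l =>
        cases l with
        | nil => rfl
        | cons v0 vs =>
          dsimp only
          have humem : u ∈ PySem.List.pyRange 0 (asap.length : Int) 1 :=
            PySem.List.mem_pyRange_one.mpr ⟨hu0, hun⟩
          have hmap : ∀ vv ∈ v0 :: vs,
              pvCompute succ asap f' vv - 1 = pvCompute succ asap (pvRank asap u) vv - 1 := by
            intro v hv
            have hvp := hpre u humem v (by rw [hg]; simpa using hv)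
            obtain ⟨⟨hv0, hvn⟩, hlt⟩ := hvp
            have hb : pvBefore asap v u = true := by
              simp only [pvBefore, decide_eq_true_iff]
              omega
            have hrw : pvRank asap v < pvRank asap u := pvRank_lt hv0 hvn hb
            rw [IH f' (by omega) v hv0 hvn (by omega),
              IH (pvRank asap u) (by omega) v hv0 hvn (by omega)]
          rw [List.map_congr_left hmap]

-- one insertion of the descending-stable insertion sort keeps the pvBefore order
lemma pvInsert_pairwise (asap : List Int) :
    ∀ (acc : List Int) (x : Int),
      acc.Pairwise (fun a b => pvBefore asap a b = true) → (∀ a ∈ acc, a < x) →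
      (PySem.List.insertBy (fun a b => decide (PySem.List.pyGetD asap b 0 < PySem.List.pyGetD asap a 0)) x acc).Pairwise
        (fun a b => pvBefore asap a b = true) ∧
      (∀ y ∈ PySem.List.insertBy (fun a b => decide (PySem.List.pyGetD asap b 0 < PySem.List.pyGetD asap a 0)) x acc,
        y = x ∨ y ∈ acc) := by
  intro acc
  induction acc with
  | nil =>
    intro x _ _
    constructor
    · simp [PySem.List.insertBy]
    · simp [PySem.List.insertBy]
  | cons y ys IHacc =>
    intro x hpw hlt
    rw [List.pairwise_cons] at hpw
    obtain ⟨hy, hys⟩ := hpw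
    simp only [PySem.List.insertBy]
    by_cases hc : PySem.List.pyGetD asap y 0 < PySem.List.pyGetD asap x 0
    · rw [if_pos (by simpa using hc)]
      constructor
      · rw [List.pairwise_cons]
        refine ⟨?_, by rw [List.pairwise_cons]; exact ⟨hy, hys⟩⟩
        intro z hz
        rcases List.mem_cons.mp hz with rfl | hz
        · simp only [pvBefore, decide_eq_true_iff]; omega
        · have hyz := hy z hz
          simp only [pvBefore, decide_eq_true_iff] at hyz ⊢
          omega
      · intro z hz
        rcases List.mem_cons.mp hz with rfl | hz
        · exact Or.inl rfl
        · exact Or.inr hz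
    · rw [if_neg (by simpa using hc)]
      have hlt' : ∀ a ∈ ys, a < x := fun a ha => hlt a (List.mem_cons_of_mem _ ha)
      obtain ⟨hins_pw, hins_mem⟩ := IHacc x hys hlt'
      constructor
      · rw [List.pairwise_cons]
        refine ⟨?_, hins_pw⟩
        intro z hz
        rcases hins_mem z hz with rfl | hz'
        · have hyx : y < z := hlt y (List.mem_cons_self)
          simp only [pvBefore, decide_eq_true_iff]
          omega
        · exact hy z hz'
      · intro z hz
        rcases List.mem_cons.mp hz with rfl | hz
        · exact Or.inr List.mem_cons_self
        · rcases hins_mem z hz with rfl | hz'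
          · exact Or.inl rfl
          · exact Or.inr (List.mem_cons_of_mem _ hz')

lemma pvFold_pairwise (asap : List Int) :
    ∀ (xs acc : List Int),
      acc.Pairwise (fun a b => pvBefore asap a b = true) →
      (∀ a ∈ acc, ∀ b ∈ xs, a < b) →
      xs.Pairwise (· < ·) →
      (xs.foldl (fun acc x => PySem.List.insertBy
          (fun a b => decide (PySem.List.pyGetD asap b 0 < PySem.List.pyGetD asap a 0)) x acc) acc).Pairwise
        (fun a b => pvBefore asap a b = true) := by
  intro xs
  induction xs with
  | nil => intro acc h _ _; exact h
  | cons x xs IHxs =>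
    intro acc hpw hcross hxs
    rw [List.pairwise_cons] at hxs
    obtain ⟨hx, hxs'⟩ := hxs
    simp only [List.foldl_cons]
    obtain ⟨hins_pw, hins_mem⟩ :=
      pvInsert_pairwise asap acc x hpw (fun a ha => hcross a ha x List.mem_cons_self)
    apply IHxs _ hins_pw _ hxs'
    intro a ha b hb
    rcases hins_mem a ha with rfl | ha'
    · exact hx b hb
    · exact hcross a ha' b (List.mem_cons_of_mem _ hb)

-- the stable descending sort is pairwise-ordered by pvBefore
lemma pvOrder_pairwise (asap : List Int) (n : Int) :
    (PySem.List.sorted (PySem.List.pyRange 0 n 1) (fun i => PySem.List.pyGetD asap i 0) true).Pairwise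
      (fun a b => pvBefore asap a b = true) := by
  rw [PySem.List.sorted_rev_eq_foldl_insertBy]
  apply pvFold_pairwise asap _ [] (by simp) (by simp)
  exact PySem.List.pairwise_lt_pyRange_one 0 n

lemma pyGetD_pySetD_int (xs : List Int) (u j x d : Int) (hu : 0 ≤ u)
    (hun : u < (xs.length : Int)) (hj : 0 ≤ j) :
    PySem.List.pyGetD (PySem.List.pySetD xs u x) j d =
      if j = u then x else PySem.List.pyGetD xs j d := by
  have hju : ((j.toNat : Int)) = j := by omega
  have huu : ((u.toNat : Int)) = u := by omega
  rw [← hju, ← huu, PySem.List.pyGetD_pySetD_natCast xs u.toNat j.toNat x d (by omega)]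
  by_cases hje : j.toNat = u.toNat
  · rw [if_pos hje, if_pos (by omega
      : ((j.toNat : Int)) = ((u.toNat : Int)))]
  · rw [if_neg hje, if_neg (by omega
      : ¬ ((j.toNat : Int)) = ((u.toNat : Int))), hju]

lemma pvMain (succ : List (Int × List Int)) (asap : List Int) (h : Int)
    (hne : asap ≠ [])
    (hpre : ∀ u ∈ PySem.List.pyRange 0 (asap.length : Int) 1,
      ∀ v ∈ (pvGet succ u).getD [],
        (0 ≤ v ∧ v < (asap.length : Int)) ∧
          PySem.List.pyGetD asap u 0 < PySem.List.pyGetD asap v 0) :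
    ∀ (S P : List Int) (alap : List Int),
      PySem.List.sorted (PySem.List.pyRange 0 (asap.length : Int) 1)
        (fun i => PySem.List.pyGetD asap i 0) true = P ++ S →
      alap.length = asap.length →
      (∀ j : Int, 0 ≤ j → j < (asap.length : Int) →
        PySem.List.pyGetD alap j 0 =
          if j ∈ P then pvCompute succ asap (pvRank asap j + 1) j else h) →
      (S.foldl (pvStepA succ asap) alap).length = asap.length ∧
      (∀ j : Int, 0 ≤ j → j < (asap.length : Int) →
        PySem.List.pyGetD (S.foldl (pvStepA succ asap) alap) j 0 =
          if j ∈ P ++ S then pvCompute succ asap (pvRank asap j + 1) j else h) := by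
  intro S
  induction S with
  | nil =>
    intro P alap _ hlen hinv
    simp only [List.foldl_nil, List.append_nil]
    exact ⟨hlen, hinv⟩
  | cons u S' IH =>
    intro P alap horder hlen hinv
    have hperm := PySem.List.sorted_perm (PySem.List.pyRange 0 (asap.length : Int) 1)
      (fun i => PySem.List.pyGetD asap i 0) true
    have hpw := pvOrder_pairwise asap (asap.length : Int)
    rw [horder] at hperm hpw
    have hnodup : (P ++ u :: S').Nodup :=
      hperm.symm.nodup (PySem.List.nodup_pyRange_one 0 _)
    have humem : u ∈ PySem.List.pyRange 0 (asap.length : Int) 1 :=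
      hperm.subset (List.mem_append_right _ List.mem_cons_self)
    obtain ⟨hu0, hun⟩ := PySem.List.mem_pyRange_one.mp humem
    have hchar : ∀ w : Int, 0 ≤ w → w < (asap.length : Int) →
        (w ∈ P ↔ pvBefore asap w u = true) := by
      intro w hw0 hwn
      constructor
      · intro hwP
        exact (List.pairwise_append.mp hpw).2.2 w hwP u List.mem_cons_self
      · intro hb
        have hwmem : w ∈ P ++ u :: S' :=
          hperm.mem_iff.mpr (PySem.List.mem_pyRange_one.mpr ⟨hw0, hwn⟩)
        rcases List.mem_append.mp hwmem with h1 | h2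
        · exact h1
        · rcases List.mem_cons.mp h2 with rfl | h3
          · rw [pvBefore_irrefl] at hb; exact absurd hb (by simp)
          · have hpw2 := (List.pairwise_append.mp hpw).2.1
            have huw := (List.pairwise_cons.mp hpw2).1 w h3
            exact (pvBefore_asymm hb huw).elim
    -- the value A stores at u is exactly B's pvCompute at u
    have hstep : ∃ x, pvStepA succ asap alap u = PySem.List.pySetD alap u x ∧
        x = pvCompute succ asap (pvRank asap u + 1) u := by
      cases hg : pvGet succ u with
      | none =>
        refine ⟨PySem.List.pyGetD asap u 0, by rw [pvStepA, hg], ?_⟩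
        simp only [pvCompute, hg]
      | some l =>
        cases l with
        | nil =>
          refine ⟨PySem.List.pyGetD asap u 0, by rw [pvStepA, hg], ?_⟩
          simp only [pvCompute, hg]
        | cons v0 vs =>
          refine ⟨_, by rw [pvStepA, hg], ?_⟩
          simp only [pvCompute, hg]
          have hmap : ∀ v ∈ v0 :: vs,
              PySem.List.pyGetD alap v 0 - 1 = pvCompute succ asap (pvRank asap u) v - 1 := by
            intro v hv
            have hvp := hpre u humem v (by rw [hg]; simpa using hv)
            obtain ⟨⟨hv0, hvn⟩, hlt⟩ := hvp
            have hb : pvBefore asap v u = true := by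
              simp only [pvBefore, decide_eq_true_iff]
              omega
            have hrV : pvRank asap v < pvRank asap u := pvRank_lt hv0 hvn hb
            rw [hinv v hv0 hvn, if_pos ((hchar v hv0 hvn).mpr hb),
              pvCompute_fuel succ asap hpre (pvRank asap u) v hv0 hvn hrV]
          rw [List.map_congr_left hmap]
          omega
    obtain ⟨x, hstepeq, hxval⟩ := hstep
    have hlen' : (pvStepA succ asap alap u).length = asap.length := by
      rw [hstepeq, PySem.List.length_pySetD, hlen]
    have hinv' : ∀ j : Int, 0 ≤ j → j < (asap.length : Int) →
        PySem.List.pyGetD (pvStepA succ asap alap u) j 0 =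
          if j ∈ P ++ [u] then pvCompute succ asap (pvRank asap j + 1) j else h := by
      intro j hj0 hjn
      rw [hstepeq, pyGetD_pySetD_int alap u j x 0 hu0 (by omega) hj0]
      by_cases hje : j = u
      · rw [if_pos hje, if_pos (by rw [hje]; exact List.mem_append_right _ List.mem_cons_self),
          hje, hxval]
      · rw [if_neg hje, hinv j hj0 hjn]
        simp only [List.mem_append, List.mem_singleton, hje, or_false]
    have horder' : PySem.List.sorted (PySem.List.pyRange 0 (asap.length : Int) 1)
        (fun i => PySem.List.pyGetD asap i 0) true = (P ++ [u]) ++ S' := by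
      rw [horder, List.append_assoc, List.singleton_append]
    obtain ⟨hL, hV⟩ := IH (P ++ [u]) (pvStepA succ asap alap u) horder' hlen' hinv'
    constructor
    · simpa using hL
    · intro j hj0 hjn
      have := hV j hj0 hjn
      rw [List.append_assoc, List.singleton_append] at this
      simpa using this

-- ===== VERDICT (by name: the statement is the Claim_ definition above) =====
theorem find_alap_times_spec : Claim_equal_find_alap_times := by
  unfold Claim_equal_find_alap_times
  intro succ pred asap _ hpre
  obtain ⟨hne, hp⟩ := hpre
  unfold Spec_find_alap_times
  cases hmax : PySem.List.max? asap (fun x => x) with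
  | none => exact absurd ((PySem.List.max?_eq_none_iff asap _).mp hmax) hne
  | some m =>
    simp only [find_alap_times, find_alap_times_alt, hmax]
    have hinit : ∀ j : Int, 0 ≤ j → j < (asap.length : Int) →
        PySem.List.pyGetD (List.replicate asap.length (m + 1)) j 0 =
          if j ∈ ([] : List Int) then pvCompute succ asap (pvRank asap j + 1) j
          else m + 1 := by
      intro j hj0 hjn
      rw [PySem.List.pyGetD_eq_getElem _ _ hj0 (by simpa using hjn)]
      simp
    obtain ⟨hlen, hvals⟩ := pvMain succ asap (m + 1) hne hp
      (PySem.List.sorted (PySem.List.pyRange 0 (asap.length : Int) 1)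
        (fun i => PySem.List.pyGetD asap i 0) true)
      [] (List.replicate asap.length (m + 1))
      (List.nil_append _).symm (by simp) hinit
    have hperm := PySem.List.sorted_perm (PySem.List.pyRange 0 (asap.length : Int) 1)
      (fun i => PySem.List.pyGetD asap i 0) true
    apply List.ext_getElem
    · rw [hlen]
      simp only [List.length_map, PySem.List.length_pyRange_one]
      omega
    · intro i h1 h2
      have hin : ((i : Int)) ∈ PySem.List.sorted (PySem.List.pyRange 0 (asap.length : Int) 1)
          (fun i => PySem.List.pyGetD asap i 0) true := by
        apply hperm.mem_iff.mpr
        apply PySem.List.mem_pyRange_one.mpr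
        constructor
        · omega
        · rw [hlen] at h1; omega
      have hv := hvals (i : Int) (by omega) (by rw [hlen] at h1; omega)
      rw [List.nil_append, if_pos hin] at hv
      rw [PySem.List.pyGetD_natCast, List.getD_eq_getElem _ _ h1] at hv
      rw [hv, List.getElem_map, PySem.List.getElem_pyRange_one 0 (asap.length : Int) i
        (by simpa using h2)]
      rw [zero_add]
      rw [pvCompute_fuel succ asap hp (asap.length + 1) (i : Int) (by omega)
        (by rw [hlen] at h1; omega)
        (by have := pvRank_le asap (i : Int); omega)]
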